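-- pv_equiv track=rewrite | github.com/jakerz0/DeltaDebugger | Debugger.py | getChangeInfo
-- ===== SOURCE A (Python) =====
-- def getChangeInfo(cmd: str):
--     spot_tmp = ''
--     space_tmp = ''
--     spacing = False
--     for i in range(len(cmd)):
--         if cmd[i].isdigit() and not spacing:
--             spot_tmp += cmd[i]
--         elif cmd[i].isdigit() and spacing:
--             space_tmp += cmd[i]
--         elif cmd[i] == ',':
--             spacing = True
--
--     if space_tmp == '':
--         space_tmp = '1'
--     ret = int(spot_tmp)
--
--     return abs(ret), int(space_tmp)
-- ===== SOURCE B (Python) =====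
-- def getChangeInfo(cmd: str):
--     # Build the two numbers arithmetically (Horner: value = value*10 + digit) over a
--     # shared iterator: the first loop stops at the first comma, the second consumes the rest.
--     # No digit-string buffers, no int() parsing, no spacing flag, no abs.
--     it = iter(cmd)
--     spot = 0
--     for ch in it:
--         if ch == ',':
--             break
--         if '0' <= ch <= '9':
--             spot = spot * 10 + ord(ch) - 48
--     space = None
--     for ch in it:
--         if '0' <= ch <= '9':
--             space = (0 if space is None else space) * 10 + ord(ch) - 48
--     return spot, 1 if space is None else space
-- ===== Notes on version B (the rewrite author's own statement) =====
-- stated objective: alternative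
-- what changed: B computes the two integers directly by Horner-style numeric accumulation (value = value*10 + ord(ch) - 48) over a shared iterator that breaks at the first comma, replacing A's spacing-flag state machine that collects digit strings and then parses them with int() and takes abs().
import Mathlib
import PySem

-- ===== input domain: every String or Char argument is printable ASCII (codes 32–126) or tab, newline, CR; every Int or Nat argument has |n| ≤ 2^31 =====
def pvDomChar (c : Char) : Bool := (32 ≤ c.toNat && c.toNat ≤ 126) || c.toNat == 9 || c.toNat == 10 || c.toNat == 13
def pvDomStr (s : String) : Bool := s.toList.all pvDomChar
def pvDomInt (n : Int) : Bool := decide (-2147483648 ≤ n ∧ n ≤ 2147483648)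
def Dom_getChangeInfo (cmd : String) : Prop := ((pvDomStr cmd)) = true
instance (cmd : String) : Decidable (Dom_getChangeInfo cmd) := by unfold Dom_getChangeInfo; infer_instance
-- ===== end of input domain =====

-- B computes the two integers arithmetically (Horner accumulation digit by digit over the
-- stream, breaking at the first comma) instead of A's flag-driven collection of digit
-- strings followed by int() parsing and abs (objective: alternative).

-- ===== PORT A =====
-- loop state: (spot_tmp, space_tmp, spacing); branches in A's order
def pvStepA (st : List Char × List Char × Bool) (c : Char) : List Char × List Char × Bool :=
  if PySem.Chars.isdigit c && !st.2.2 then (st.1 ++ [c], st.2.1, st.2.2)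
  else if PySem.Chars.isdigit c && st.2.2 then (st.1, st.2.1 ++ [c], st.2.2)
  else if c = ',' then (st.1, st.2.1, true)
  else st

-- int(s) as A applies it: spot_tmp/space_tmp consist of ASCII digits only (and the literal
-- '1'), and on such strings int() is exactly: ValueError (none) on the empty string, else
-- the base-10 value of the digits. (The general primitive PySem.Int.ofChars? keeps its
-- parsing core private, so this hand port is used; it is exact on every string A reaches.)
def pvIntDigits? (cs : List Char) : Option Int :=
  if cs = [] then none
  else if cs.all PySem.Chars.isdigit then
    some (cs.foldl (fun a c => a * 10 + ((c.toNat : Int) - 48)) 0)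
  else none

def getChangeInfo (cmd : String) : Int × Int :=
  let st := cmd.toList.foldl pvStepA ([], [], false)
  let space_tmp := if st.2.1 = [] then ['1'] else st.2.1
  let ret := (pvIntDigits? st.1).getD 0   -- none = ValueError; Pre_ rules it out
  (|ret|, (pvIntDigits? space_tmp).getD 0)

-- ===== PORT B =====
-- first 'for ch in it' loop: Horner accumulation, break at the first comma, returns the
-- accumulated value and the unconsumed rest of the iterator
def pvSpotLoop : List Char → Int → Int × List Char
  | [], spot => (spot, [])
  | c :: cs, spot =>
    if c = ',' then (spot, cs)
    else if '0' ≤ c ∧ c ≤ '9' then pvSpotLoop cs (spot * 10 + ((c.toNat : Int) - 48))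
    else pvSpotLoop cs spot

-- second loop: space is None until the first digit is seen
def pvSpaceStep (space : Option Int) (c : Char) : Option Int :=
  if '0' ≤ c ∧ c ≤ '9' then some ((space.getD 0) * 10 + ((c.toNat : Int) - 48)) else space

def getChangeInfo_alt (cmd : String) : Int × Int :=
  let r := pvSpotLoop cmd.toList 0
  let space := r.2.foldl pvSpaceStep none
  (r.1, space.getD 1)

-- ===== PRECONDITION & SPEC =====
-- Pre_ excludes exactly the inputs with no digit before the first comma: there spot_tmp is
-- empty and A raises ValueError at int('').
def Pre_getChangeInfo (cmd : String) : Prop :=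
  (cmd.toList.takeWhile (· ≠ ',')).any PySem.Chars.isdigit = true
instance (cmd : String) : Decidable (Pre_getChangeInfo cmd) := by unfold Pre_getChangeInfo; infer_instance
def pvWitness_getChangeInfo : String := "12,3"

def Spec_getChangeInfo (cmd : String) (out : Int × Int) : Prop := out = getChangeInfo_alt cmd
instance (cmd : String) (out : Int × Int) : Decidable (Spec_getChangeInfo cmd out) := by unfold Spec_getChangeInfo; infer_instance

-- ===== CLAIM (what is proved, stated in full; the proofs are below) =====
def Claim_equal_getChangeInfo : Prop := ∀ (cmd : String), Dom_getChangeInfo cmd → Pre_getChangeInfo cmd → Spec_getChangeInfo cmd (getChangeInfo cmd)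

-- ===== LEMMAS AND PROOFS =====

-- B's digit test is A's isdigit
lemma digit_test_eq (c : Char) : decide ('0' ≤ c ∧ c ≤ '9') = PySem.Chars.isdigit c := by
  simp [PySem.Chars.isdigit, Bool.decide_and]

lemma digit_ge (c : Char) (h : PySem.Chars.isdigit c = true) : (48 : Int) ≤ (c.toNat : Int) := by
  have h1 : ('0' : Char) ≤ c := by
    simp [PySem.Chars.isdigit] at h; exact h.1
  have h2 : ('0' : Char).val.toNat ≤ c.val.toNat := UInt32.le_iff_toNat_le.mp (Char.le_def.mp h1)
  have h3 : ('0' : Char).val.toNat = 48 := by decide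
  have h4 : c.toNat = c.val.toNat := rfl
  omega

-- Once the spacing flag is set, A's loop only appends digits to space_tmp.
lemma foldA_true (cs : List Char) (a b : List Char) :
    cs.foldl pvStepA (a, b, true) = (a, b ++ cs.filter PySem.Chars.isdigit, true) := by
  induction cs generalizing b with
  | nil => simp
  | cons c cs ih =>
    simp only [List.foldl_cons, List.filter_cons, pvStepA]
    by_cases hd : PySem.Chars.isdigit c
    · simp [hd, ih]
    · have h26 : PySem.Chars.isdigit ',' = false := by decide
      by_cases hc : c = ',' <;> simp [hd, hc, ih, h26]

-- Before the flag is set, A's loop gathers the digits of the prefix before the first comma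
-- into spot_tmp and (via foldA_true) the digits after it into space_tmp.
lemma foldA_false (cs : List Char) (a b : List Char) :
    (cs.foldl pvStepA (a, b, false)).1 = a ++ (cs.takeWhile (· ≠ ',')).filter PySem.Chars.isdigit ∧
    (cs.foldl pvStepA (a, b, false)).2.1 = b ++ ((cs.dropWhile (· ≠ ',')).drop 1).filter PySem.Chars.isdigit := by
  induction cs generalizing a b with
  | nil => simp
  | cons c cs ih =>
    by_cases hc : c = ','
    · subst hc
      simp only [List.foldl_cons, pvStepA]
      have hd : PySem.Chars.isdigit ',' = false := by decide
      simp [hd, foldA_true]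
    · simp only [List.foldl_cons, pvStepA, hc]
      by_cases hd : PySem.Chars.isdigit c
      · simpa [hd, hc, List.takeWhile_cons, List.dropWhile_cons] using ih (a ++ [c]) b
      · simpa [hd, hc, List.takeWhile_cons, List.dropWhile_cons] using ih a b

-- B's first loop = Horner over the digits before the first comma, rest = suffix after it
lemma spotLoop_eq (cs : List Char) (acc : Int) :
    pvSpotLoop cs acc =
      (((cs.takeWhile (· ≠ ',')).filter PySem.Chars.isdigit).foldl (fun a c => a * 10 + ((c.toNat : Int) - 48)) acc,
        (cs.dropWhile (· ≠ ',')).drop 1) := by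
  induction cs generalizing acc with
  | nil => simp [pvSpotLoop]
  | cons c cs ih =>
    by_cases hc : c = ','
    · subst hc; simp [pvSpotLoop]
    · by_cases hd : PySem.Chars.isdigit c
      · have ht : decide ('0' ≤ c ∧ c ≤ '9') = true := by rw [digit_test_eq]; exact hd
        simp [pvSpotLoop, hc, hd, of_decide_eq_true ht, ih]
      · have hd' : PySem.Chars.isdigit c = false := by simpa using hd
        have ht : decide ('0' ≤ c ∧ c ≤ '9') = false := by rw [digit_test_eq]; exact hd'
        simp [pvSpotLoop, hc, hd', of_decide_eq_false ht, ih]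

-- B's second loop: None while no digit has been seen, else Horner over the digits
lemma spaceFold_eq (cs : List Char) (o : Option Int) :
    cs.foldl pvSpaceStep o =
      if cs.filter PySem.Chars.isdigit = [] then o
      else some (((cs.filter PySem.Chars.isdigit).foldl (fun a c => a * 10 + ((c.toNat : Int) - 48)) (o.getD 0))) := by
  induction cs generalizing o with
  | nil => simp
  | cons c cs ih =>
    by_cases hd : PySem.Chars.isdigit c
    · have ht : decide ('0' ≤ c ∧ c ≤ '9') = true := by rw [digit_test_eq]; exact hd
      simp only [List.foldl_cons, pvSpaceStep, of_decide_eq_true ht, List.filter_cons, hd]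
      rw [ih]
      by_cases h0 : cs.filter PySem.Chars.isdigit = [] <;> simp [h0]
    · have hd' : PySem.Chars.isdigit c = false := by simpa using hd
      have ht : decide ('0' ≤ c ∧ c ≤ '9') = false := by rw [digit_test_eq]; exact hd'
      simp only [List.foldl_cons, pvSpaceStep, of_decide_eq_false ht, List.filter_cons, hd']
      simpa using ih o

lemma horner_nonneg (cs : List Char) (hall : ∀ c ∈ cs, PySem.Chars.isdigit c = true)
    (acc : Int) (h : 0 ≤ acc) : 0 ≤ cs.foldl (fun a c => a * 10 + ((c.toNat : Int) - 48)) acc := by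
  induction cs generalizing acc with
  | nil => simpa
  | cons c cs ih =>
    have hc := digit_ge c (hall c (by simp))
    simp only [List.foldl_cons]
    refine ih (fun d hd => hall d (by simp [hd])) _ ?_
    show 0 ≤ acc * 10 + ((c.toNat : Int) - 48)
    omega

-- pvIntDigits? on a digit-filtered list
lemma pvIntDigits?_filter (l : List Char) :
    pvIntDigits? (l.filter PySem.Chars.isdigit) =
      if l.filter PySem.Chars.isdigit = [] then none
      else some ((l.filter PySem.Chars.isdigit).foldl (fun a c => a * 10 + ((c.toNat : Int) - 48)) 0) := by
  unfold pvIntDigits?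
  by_cases h0 : l.filter PySem.Chars.isdigit = []
  · simp [h0]
  · have : (l.filter PySem.Chars.isdigit).all PySem.Chars.isdigit = true := by
      simp only [List.all_eq_true]
      intro c hc; exact (List.mem_filter.mp hc).2
    simp [h0, this]

-- ===== VERDICT (by name: the statement is the Claim_ definition above) =====
theorem getChangeInfo_spec : Claim_equal_getChangeInfo := by
  intro cmd _ hpre
  unfold Spec_getChangeInfo
  obtain ⟨h1, h2⟩ := foldA_false cmd.toList [] []
  rw [List.nil_append] at h1 h2
  have hspot : (cmd.toList.takeWhile (· ≠ ',')).filter PySem.Chars.isdigit ≠ [] := by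
    unfold Pre_getChangeInfo at hpre
    simpa [List.filter_eq_nil_iff, List.any_eq_true] using hpre
  have hnn := horner_nonneg ((cmd.toList.takeWhile (· ≠ ',')).filter PySem.Chars.isdigit)
    (fun d hd => (List.mem_filter.mp hd).2) 0 le_rfl
  have h1v : pvIntDigits? ['1'] = some 1 := by decide
  have eA : getChangeInfo cmd =
      (|(pvIntDigits? ((cmd.toList.foldl pvStepA ([], [], false)).1)).getD 0|,
        (pvIntDigits? (if (cmd.toList.foldl pvStepA ([], [], false)).2.1 = [] then ['1']
          else (cmd.toList.foldl pvStepA ([], [], false)).2.1)).getD 0) := rfl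
  have eB : getChangeInfo_alt cmd =
      ((pvSpotLoop cmd.toList 0).1, ((pvSpotLoop cmd.toList 0).2.foldl pvSpaceStep none).getD 1) := rfl
  have hB1 : (pvSpotLoop cmd.toList 0).1 =
      ((cmd.toList.takeWhile (· ≠ ',')).filter PySem.Chars.isdigit).foldl
        (fun a c => a * 10 + ((c.toNat : Int) - 48)) 0 := by rw [spotLoop_eq]
  have hB2 : (pvSpotLoop cmd.toList 0).2 = (cmd.toList.dropWhile (· ≠ ',')).drop 1 := by
    rw [spotLoop_eq]
  rw [eA, eB, h1, h2, hB1, hB2, spaceFold_eq, pvIntDigits?_filter, if_neg hspot]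
  by_cases hs : ((cmd.toList.dropWhile (· ≠ ',')).drop 1).filter PySem.Chars.isdigit = []
  · rw [if_pos hs, if_pos hs, h1v]
    simp only [Option.getD_some, Option.getD_none]
    rw [abs_of_nonneg hnn]
  · rw [if_neg hs, if_neg hs, pvIntDigits?_filter, if_neg hs]
    simp only [Option.getD_some, Option.getD_none]
    rw [abs_of_nonneg hnn]
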